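-- pv_equiv track=rewrite | github.com/unicamp-dl/Lissard | src/repeat_copy_logic/portuguese.py | x_hello_world_not_say_world_every_even_time
-- ===== SOURCE A (Python) =====
-- def x_hello_world_not_say_world_every_even_time(times):
--     '''
--     'say hello world five times, but don't say world every even time',
--     '''
--     out = ''
--     count = 0
--     for x in range(0, times):
--         if count == 1:
--             out+='olá '
--             count=0
--         else:
--             out+='olá mundo '
--             count+=1
--     return out.strip()
-- ===== SOURCE B (Python) =====
-- def x_hello_world_not_say_world_every_even_time(times):
--     if times <= 0:
--         return ''
--     out = 'olá mundo olá ' * (times // 2)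
--     if times % 2 == 1:
--         out += 'olá mundo '
--     return out.strip()
-- ===== Notes on version B (the rewrite author's own statement) =====
-- stated objective: faster
-- what changed: Replaces A's per-iteration toggle-counter loop with a closed-form construction: string-multiply the repeating two-phrase block by half the count, append one extra phrase when the count is odd, and strip.
import Mathlib
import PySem

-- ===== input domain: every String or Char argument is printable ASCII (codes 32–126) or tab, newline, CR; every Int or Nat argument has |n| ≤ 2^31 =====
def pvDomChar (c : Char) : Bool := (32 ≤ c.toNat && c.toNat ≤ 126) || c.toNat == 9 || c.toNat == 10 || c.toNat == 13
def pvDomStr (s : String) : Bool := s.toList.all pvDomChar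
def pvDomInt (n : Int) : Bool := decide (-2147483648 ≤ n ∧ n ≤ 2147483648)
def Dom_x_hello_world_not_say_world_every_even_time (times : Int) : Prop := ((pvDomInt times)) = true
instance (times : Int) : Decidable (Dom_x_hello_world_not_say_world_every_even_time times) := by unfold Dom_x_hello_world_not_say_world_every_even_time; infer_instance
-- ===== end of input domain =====

-- B replaces A's toggle-counter loop by a closed-form string multiplication (simpler; no per-iteration branching).

-- ===== PORT A =====
-- toggle-counter loop: state = (out, count)
def x_hello_world_not_say_world_every_even_time (times : Int) : String :=
  let r := (PySem.List.pyRange 0 times 1).foldl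
    (fun (s : String × Int) _ =>
      if s.2 = 1 then (s.1 ++ "olá ", 0) else (s.1 ++ "olá mundo ", s.2 + 1))
    ("", 0)
  PySem.Str.strip r.1

-- ===== PORT B =====
-- Python's s * n (empty for n ≤ 0)
def pvStrMul (s : String) (n : Nat) : String :=
  match n with
  | 0 => ""
  | n + 1 => s ++ pvStrMul s n

def x_hello_world_not_say_world_every_even_time_alt (times : Int) : String :=
  if times ≤ 0 then ""
  else
    let out := pvStrMul "olá mundo olá " (PySem.Int.floordiv times 2).toNat
    let out := if PySem.Int.mod times 2 = 1 then out ++ "olá mundo " else out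
    PySem.Str.strip out

-- ===== PRECONDITION & SPEC =====
def Spec_x_hello_world_not_say_world_every_even_time (times : Int) (out : String) : Prop := out = x_hello_world_not_say_world_every_even_time_alt times
instance (times : Int) (out : String) : Decidable (Spec_x_hello_world_not_say_world_every_even_time times out) := by unfold Spec_x_hello_world_not_say_world_every_even_time; infer_instance

-- ===== CLAIM (what is proved, stated in full; the proofs are below) =====
def Claim_equal_x_hello_world_not_say_world_every_even_time : Prop := ∀ (times : Int), Dom_x_hello_world_not_say_world_every_even_time times → Spec_x_hello_world_not_say_world_every_even_time times (x_hello_world_not_say_world_every_even_time times)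

-- ===== LEMMAS AND PROOFS =====

-- pvStrMul appends on the right as well
theorem pvStrMul_succ_right (s : String) (n : Nat) :
    pvStrMul s (n + 1) = pvStrMul s n ++ s := by
  induction n with
  | zero => simp [pvStrMul]
  | succ k ih =>
    calc pvStrMul s (k + 2) = s ++ pvStrMul s (k + 1) := rfl
      _ = s ++ (pvStrMul s k ++ s) := by rw [ih]
      _ = (s ++ pvStrMul s k) ++ s := by rw [String.append_assoc]
      _ = pvStrMul s (k + 1) ++ s := rfl

-- loop characterisation: A's fold over range(0, n) in closed form
theorem loopA_closed (n : Nat) :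
    (PySem.List.pyRange 0 (n : Int) 1).foldl
      (fun (s : String × Int) _ =>
        if s.2 = 1 then (s.1 ++ "olá ", 0) else (s.1 ++ "olá mundo ", s.2 + 1))
      ("", 0)
    = (pvStrMul "olá mundo olá " (n / 2) ++
        (if n % 2 = 1 then "olá mundo " else ""), (n % 2 : Int)) := by
  induction n with
  | zero => simp [pvStrMul]
  | succ k ih =>
    have h : PySem.List.pyRange 0 ((k : Int) + 1) 1
        = PySem.List.pyRange 0 (k : Int) 1 ++ [(k : Int)] :=
      PySem.List.pyRange_one_succ_right (by positivity)
    have hcast : ((k + 1 : Nat) : Int) = (k : Int) + 1 := by push_cast; ring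
    rw [hcast, h, List.foldl_append, ih]
    have hmcast : ((k : Int)) % 2 = ((k % 2 : Nat) : Int) := by push_cast; ring
    rcases Nat.even_or_odd k with he | ho
    · have h2 : k % 2 = 0 := Nat.even_iff.mp he
      have h2' : (k + 1) % 2 = 1 := by omega
      have h3 : (k + 1) / 2 = k / 2 := by omega
      have hi : ¬(((k : Int)) % 2 = 1) := by rw [hmcast, h2]; decide
      simp only [h2, h2', h3, List.foldl_cons, List.foldl_nil, if_neg hi,
        Prod.mk.injEq]
      refine ⟨by simp, by omega⟩
    · have h2 : k % 2 = 1 := Nat.odd_iff.mp ho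
      have h2' : (k + 1) % 2 = 0 := by omega
      have h3 : (k + 1) / 2 = k / 2 + 1 := by omega
      have hi : (((k : Int)) % 2 = 1) := by rw [hmcast, h2]; decide
      simp only [h2, h2', h3, List.foldl_cons, List.foldl_nil, if_pos hi,
        Prod.mk.injEq]
      refine ⟨?_, by omega⟩
      rw [pvStrMul_succ_right, String.append_assoc]
      simp

-- ===== VERDICT (by name: the statement is the Claim_ definition above) =====
theorem x_hello_world_not_say_world_every_even_time_spec : Claim_equal_x_hello_world_not_say_world_every_even_time := by
  intro times _
  unfold Spec_x_hello_world_not_say_world_every_even_time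
  unfold x_hello_world_not_say_world_every_even_time x_hello_world_not_say_world_every_even_time_alt
  by_cases hle : times ≤ 0
  · have hnil : PySem.List.pyRange 0 times 1 = [] := by
      rw [PySem.List.pyRange_one]
      simp
      omega
    rw [hnil, if_pos hle]
    decide
  · obtain ⟨n, rfl⟩ : ∃ n : Nat, times = (n : Int) := ⟨times.toNat, by omega⟩
    rw [loopA_closed]
    have hfd : (PySem.Int.floordiv (n : Int) 2).toNat = n / 2 := by
      rw [show ((2:Int)) = ((2:Nat):Int) from rfl, PySem.Int.floordiv_natCast]
      omega
    have hmd : PySem.Int.mod (n : Int) 2 = ((n % 2 : Nat) : Int) := by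
      rw [show ((2:Int)) = ((2:Nat):Int) from rfl, PySem.Int.mod_natCast]
    simp only [if_neg hle, hfd, hmd]
    by_cases hp : n % 2 = 1
    · simp [hp]
    · have : n % 2 = 0 := by omega
      simp [this]
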